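-- pv_equiv track=rewrite | github.com/YousefAl0taibi/QSGame | QSGame.py | best_QS
-- ===== SOURCE A (Python) =====
-- def best_QS(questions:dict,data:dict):#take the best question
--     lst_bestQS={}
--
--     for qskey,(attr,attr_value) in questions.items():
--         left=sum(1 for d in data.values() if d[attr]==attr_value)
--         right=sum(1 for d in data.values() if d[attr]!=attr_value)
--         abs_sum=abs(left-right)
--
--
--         if left>0 and right>0:#to take a valuable question
--             lst_bestQS[qskey]=abs_sum
--
--
--     if not lst_bestQS:
--         return None
--
--     bestQS=min(lst_bestQS, key=lst_bestQS.get)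
--     return bestQS
-- ===== SOURCE B (Python) =====
-- def best_QS(questions: dict, data: dict):
--     # Index pass: count, for each attribute the questions ask about, how often
--     # each of its values occurs in the data; then score every question by one
--     # O(1) lookup instead of rescanning the whole data per question.
--     attrs = {attr for attr, _ in questions.values()}
--     counts = {}
--     for d in data.values():
--         for attr in attrs:
--             p = (attr, d[attr])
--             counts[p] = counts.get(p, 0) + 1
--     total = len(data)
--     best_key = None
--     best_val = None
--     for qskey, (attr, attr_value) in questions.items():
--         left = counts.get((attr, attr_value), 0)
--         if 0 < left < total:
--             balance = abs(2 * left - total)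
--             if best_val is None or balance < best_val:
--                 best_key, best_val = qskey, balance
--     return best_key
-- ===== Notes on version B (the rewrite author's own statement) =====
-- stated objective: faster
-- what changed: B replaces A's per-question rescans of the whole data (two generator passes per question, collected into a score dict then min(key=get)) with a one-time (attribute, value) counter built in a single pass over the data for the set of asked-about attributes, so each question is then scored by a single dictionary lookup under a running minimum; Pre_ excludes inputs where both Pythons raise KeyError (a question attribute missing from some data row) plus assoc lists with duplicate keys, which no Python dict input can carry.
import Mathlib
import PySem

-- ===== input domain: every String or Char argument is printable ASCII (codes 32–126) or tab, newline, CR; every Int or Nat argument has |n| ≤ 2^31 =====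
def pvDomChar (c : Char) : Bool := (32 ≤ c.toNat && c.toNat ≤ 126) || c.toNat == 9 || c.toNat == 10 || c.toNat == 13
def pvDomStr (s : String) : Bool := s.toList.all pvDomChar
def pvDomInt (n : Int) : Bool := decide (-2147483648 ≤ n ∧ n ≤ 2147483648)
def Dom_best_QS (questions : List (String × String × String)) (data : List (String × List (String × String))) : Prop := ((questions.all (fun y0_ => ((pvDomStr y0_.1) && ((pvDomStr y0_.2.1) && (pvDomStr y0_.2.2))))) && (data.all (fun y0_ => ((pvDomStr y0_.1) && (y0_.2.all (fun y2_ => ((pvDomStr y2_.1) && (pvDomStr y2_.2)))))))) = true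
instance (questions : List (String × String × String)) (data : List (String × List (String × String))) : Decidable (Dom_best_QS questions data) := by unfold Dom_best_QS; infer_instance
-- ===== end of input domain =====

-- B indexes the data once in an (attribute, value) counter so each question is scored by one lookup
-- instead of scanning the data (return value only; neither mutates).

-- ===== PORT A =====
-- d[attr] == attr_value for one data row (Python dict lookup; missing key = KeyError, excluded by Pre_)
def pvHit (attr av : String) (kd : String × List (String × String)) : Bool :=
  (PySem.Dict.mk kd.2).get? attr == some av

-- sum(1 for d in data.values() if d[attr] == attr_value)
def pvLeft (data : List (String × List (String × String))) (attr av : String) : Int :=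
  data.foldl (fun n kd => if pvHit attr av kd then n + 1 else n) 0

-- sum(1 for d in data.values() if d[attr] != attr_value)
def pvRight (data : List (String × List (String × String))) (attr av : String) : Int :=
  data.foldl (fun n kd => if !(pvHit attr av kd) then n + 1 else n) 0

-- body of A's loop over questions.items()
def pvStepA (data : List (String × List (String × String))) (acc : PySem.Dict String Int)
    (q : String × String × String) : PySem.Dict String Int :=
  let left := pvLeft data q.2.1 q.2.2
  let right := pvRight data q.2.1 q.2.2
  if left > 0 ∧ right > 0 then acc.insert q.1 |left - right| else acc

-- first pair attaining the minimal second component (the fold below is min(lst, key=lst.get))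
def pvPick (best x : String × Int) : String × Int := if x.2 < best.2 then x else best

def best_QS (questions : List (String × String × String)) (data : List (String × List (String × String))) : Option String :=
  let lst : PySem.Dict String Int := questions.foldl (pvStepA data) PySem.Dict.empty
  match lst.items with
  | [] => none
  | kv :: rest => some ((rest.foldl pvPick kv).1)

-- ===== PORT B =====
-- attrs = {attr for attr, _ in questions.values()}
def pvAttrs (questions : List (String × String × String)) : List String :=
  PySem.Set.ofList (questions.map (fun q => q.2.1))

-- the Python looks up d[attr] (KeyError when missing — excluded by Pre_); getD "" is exact where the key is present
def pvRowVal (kd : String × List (String × String)) (attr : String) : String :=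
  (PySem.Dict.mk kd.2).getD attr ""

-- counts[(attr, d[attr])] = counts.get(..., 0) + 1 for every asked-about attr of every data row
def pvCounter (attrs : List String) (data : List (String × List (String × String))) :
    PySem.Dict (String × String) Int :=
  data.foldl
    (fun c kd => attrs.foldl
      (fun c a => c.insert (a, pvRowVal kd a) (c.getD (a, pvRowVal kd a) 0 + 1)) c)
    PySem.Dict.empty

-- body of B's question loop: one counter lookup, running best (key, balance)
def pvStepB (counts : PySem.Dict (String × String) Int) (total : Int)
    (st : Option String × Option Int) (q : String × String × String) : Option String × Option Int :=
  let left := counts.getD (q.2.1, q.2.2) 0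
  if 0 < left ∧ left < total then
    let balance := |2 * left - total|
    match st.2 with
    | none => (some q.1, some balance)
    | some bv => if balance < bv then (some q.1, some balance) else st
  else st

def best_QS_alt (questions : List (String × String × String)) (data : List (String × List (String × String))) : Option String :=
  let counts := pvCounter (pvAttrs questions) data
  let total : Int := data.length
  (questions.foldl (pvStepB counts total) (none, none)).1

-- ===== PRECONDITION & SPEC =====
-- Pre_ excludes (a) inputs where some question's attribute is missing from some data row — there
-- both Pythons raise KeyError — and (b) assoc lists where a question key, or a queried attribute
-- within one row, is duplicated: a Python dict cannot carry duplicate keys, so the assoc-list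
-- behaviour there (first-match lookup / overwrite-in-place vs per-occurrence iteration) is a
-- representation artefact.
def Pre_best_QS (questions : List (String × String × String)) (data : List (String × List (String × String))) : Prop :=
  (questions.map Prod.fst).Nodup ∧
  (∀ q ∈ questions, ∀ kd ∈ data, (kd.2.map Prod.fst).count q.2.1 = 1)
instance (questions : List (String × String × String)) (data : List (String × List (String × String))) : Decidable (Pre_best_QS questions data) := by unfold Pre_best_QS; infer_instance

def pvWitness_best_QS : (List (String × String × String)) × (List (String × List (String × String))) :=
  ([("q1", ("a", "x")), ("q2", ("b", "u")), ("q3", ("a", "y"))],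
   [("d1", [("a", "x"), ("b", "u")]), ("d2", [("a", "y"), ("b", "v")]), ("d3", [("a", "x"), ("b", "v")])])

def Spec_best_QS (questions : List (String × String × String)) (data : List (String × List (String × String))) (out : Option String) : Prop := out = best_QS_alt questions data
instance (questions : List (String × String × String)) (data : List (String × List (String × String))) (out : Option String) : Decidable (Spec_best_QS questions data out) := by unfold Spec_best_QS; infer_instance

-- ===== CLAIM (what is proved, stated in full; the proofs are below) =====
def Claim_equal_best_QS : Prop := ∀ (questions : List (String × String × String)) (data : List (String × List (String × String))), Dom_best_QS questions data → Pre_best_QS questions data → Spec_best_QS questions data (best_QS questions data)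

-- ===== LEMMAS AND PROOFS =====

-- the per-question outcome both loops realise: none = not valuable, some (key, balance) otherwise
def pvG (data : List (String × List (String × String))) (q : String × String × String) : Option (String × Int) :=
  let left := pvLeft data q.2.1 q.2.2
  if 0 < left ∧ left < (data.length : Int) then some (q.1, |2 * left - (data.length : Int)|) else none

lemma foldl_count_eq (p : α → Bool) : ∀ (l : List α) (n : Int),
    l.foldl (fun n x => if p x then n + 1 else n) n = n + l.countP p := by
  intro l
  induction l with
  | nil => simp
  | cons x l ih =>
    intro n
    by_cases h : p x
    · simp [h, ih]; ring
    · simp [h, ih]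

lemma countP_not_add (p : α → Bool) (l : List α) :
    l.countP p + l.countP (fun x => !(p x)) = l.length := by
  induction l with
  | nil => simp
  | cons x l ih => by_cases h : p x <;> simp [h] <;> omega

lemma pvRight_eq (data : List (String × List (String × String))) (attr av : String) :
    pvRight data attr av = (data.length : Int) - pvLeft data attr av := by
  unfold pvLeft pvRight
  rw [foldl_count_eq, foldl_count_eq]
  have := countP_not_add (pvHit attr av) data
  omega

-- the inner attr loop, rephrased over the mapped pair list (pure foldl/map reshuffle)
lemma foldl_insert_key : ∀ (l : List String) (f : String → String × String)
    (c : PySem.Dict (String × String) Int),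
    l.foldl (fun c a => c.insert (f a) (c.getD (f a) 0 + 1)) c
      = (l.map f).foldl (fun c p => c.insert p (c.getD p 0 + 1)) c := by
  intro l
  induction l with
  | nil => intro f c; rfl
  | cons a l ih => intro f c; simp [ih]

-- the one-time counter read back at p is the count of p among the (attr, row value) pairs
lemma counter_getD (attrs : List String) (data : List (String × List (String × String)))
    (p : String × String) :
    (pvCounter attrs data).getD p 0
      = ((data.flatMap (fun kd => attrs.map (fun a => (a, pvRowVal kd a)))).count p : Int) := by
  unfold pvCounter
  suffices h : ∀ (l : List (String × List (String × String))) (c : PySem.Dict (String × String) Int),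
      (l.foldl (fun c kd => attrs.foldl
          (fun c a => c.insert (a, pvRowVal kd a) (c.getD (a, pvRowVal kd a) 0 + 1)) c) c).getD p 0
        = c.getD p 0 + ((l.flatMap (fun kd => attrs.map (fun a => (a, pvRowVal kd a)))).count p : Int) by
    rw [h]; simp [PySem.Dict.getD_empty]
  intro l
  induction l with
  | nil => simp
  | cons kd l ih =>
    intro c
    rw [List.foldl_cons, ih, foldl_insert_key attrs (fun a => (a, pvRowVal kd a)) c,
        PySem.Dict.getD_foldl_insert_add_one]
    simp [List.count_append]
    ring

-- among the pairs a single row contributes, (attr, av) occurs once iff its value there is av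
lemma count_map_pair (av : String) (g : String → String) : ∀ (attrs : List String) (attr : String),
    attrs.Nodup → attr ∈ attrs →
    ((attrs.map (fun a => (a, g a))).count (attr, av) : Int) = (if g attr = av then 1 else 0) := by
  intro attrs
  induction attrs with
  | nil => simp
  | cons a rest ih =>
    intro attr hnd hmem
    have hnd' := (List.nodup_cons.mp hnd).2
    have hnotin := (List.nodup_cons.mp hnd).1
    rw [List.map_cons, List.count_cons]
    by_cases he : a = attr
    · subst he
      have hzero : (rest.map (fun a' => (a', g a'))).count (a, av) = 0 := by
        rw [List.count_eq_zero]
        intro hmem2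
        obtain ⟨a', ha', he2⟩ := List.mem_map.mp hmem2
        have ha1 : a' = a := ((Prod.mk.injEq ..).mp he2).1
        exact hnotin (ha1 ▸ ha')
      by_cases hv : g a = av
      · simp [hzero, hv]
      · have hne : ¬ ((a, g a) = (a, av)) := by simp [hv]
        simp [hzero, hne, hv]
    · have hmem' : attr ∈ rest := by
        cases List.mem_cons.mp hmem with
        | inl h => exact absurd h.symm he
        | inr h => exact h
      have hne : ¬ ((a, g a) = (attr, av)) := by
        intro h; exact he ((Prod.mk.injEq ..).mp h).1
      simp [hne, ih attr hnd' hmem']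

-- a present, unduplicated key's row value is av exactly when A's lookup hits
lemma rowVal_eq_hit (attr av : String) (kd : String × List (String × String))
    (h1 : (kd.2.map Prod.fst).count attr = 1) :
    (if pvRowVal kd attr = av then (1 : Int) else 0) = (if pvHit attr av kd then 1 else 0) := by
  have hattr : attr ∈ kd.2.map Prod.fst := List.count_pos_iff.mp (by rw [h1]; exact Nat.one_pos)
  obtain ⟨p, hp, hpe⟩ := List.mem_map.mp hattr
  obtain ⟨v, hv⟩ : ∃ v, (PySem.Dict.mk kd.2).get? attr = some v := by
    cases hg : (PySem.Dict.mk kd.2).get? attr with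
    | none =>
      have hno := (PySem.Dict.get?_eq_none_iff_not_mem_keys _ _).mp hg
      exact absurd (show ∃ x, (attr, x) ∈ kd.2 from ⟨p.2, by rw [← hpe]; simpa using hp⟩)
        (by simpa using hno)
    | some v => exact ⟨v, rfl⟩
  unfold pvRowVal pvHit
  rw [PySem.Dict.getD_eq_get?_getD, hv]
  by_cases he : v = av <;> simp [he]

-- hence the counter lookup equals A's 'left' count
lemma counter_eq_left (attrs : List String) (data : List (String × List (String × String)))
    (attr av : String) (hnd : attrs.Nodup) (hmem : attr ∈ attrs)
    (hrows : ∀ kd ∈ data, (kd.2.map Prod.fst).count attr = 1) :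
    (pvCounter attrs data).getD (attr, av) 0 = pvLeft data attr av := by
  rw [counter_getD]
  unfold pvLeft
  rw [foldl_count_eq]
  induction data with
  | nil => simp
  | cons kd l ih =>
    have h1 := hrows kd (List.mem_cons_self ..)
    have hrest : ∀ kd' ∈ l, (kd'.2.map Prod.fst).count attr = 1 :=
      fun kd' h => hrows kd' (List.mem_cons_of_mem _ h)
    rw [List.flatMap_cons, List.count_append, List.countP_cons]
    push_cast
    rw [ih hrest, count_map_pair av (pvRowVal kd) attrs attr hnd hmem]
    rw [rowVal_eq_hit attr av kd h1]
    by_cases h : pvHit attr av kd <;> simp [h] <;> ring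

lemma stepA_eq (data : List (String × List (String × String))) (acc : PySem.Dict String Int)
    (q : String × String × String) :
    pvStepA data acc q = match pvG data q with
      | none => acc
      | some kv => acc.insert kv.1 kv.2 := by
  unfold pvStepA pvG
  rw [pvRight_eq]
  by_cases h : 0 < pvLeft data q.2.1 q.2.2 ∧ pvLeft data q.2.1 q.2.2 < (data.length : Int)
  · have h1 : pvLeft data q.2.1 q.2.2 > 0 ∧ (data.length : Int) - pvLeft data q.2.1 q.2.2 > 0 := by omega
    have habs : |pvLeft data q.2.1 q.2.2 - ((data.length : Int) - pvLeft data q.2.1 q.2.2)|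
        = |2 * pvLeft data q.2.1 q.2.2 - (data.length : Int)| := by ring_nf
    simp only [if_pos h, if_pos h1, habs]
  · have h1 : ¬ (pvLeft data q.2.1 q.2.2 > 0 ∧ (data.length : Int) - pvLeft data q.2.1 q.2.2 > 0) := by omega
    simp only [if_neg h, if_neg h1]

lemma A_items (data : List (String × List (String × String))) :
    ∀ (qs : List (String × String × String)) (acc : PySem.Dict String Int),
    (qs.map Prod.fst).Nodup → (∀ q ∈ qs, acc.contains q.1 = false) →
    (qs.foldl (pvStepA data) acc).items = acc.items ++ qs.filterMap (pvG data) := by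
  intro qs
  induction qs with
  | nil => simp
  | cons q qs ih =>
    intro acc hnd hfresh
    have hq : acc.contains q.1 = false := hfresh q (List.mem_cons_self ..)
    have hnd' : (qs.map Prod.fst).Nodup := (List.nodup_cons.mp hnd).2
    have hqnot : q.1 ∉ qs.map Prod.fst := (List.nodup_cons.mp hnd).1
    rw [List.foldl_cons, stepA_eq]
    cases hg : pvG data q with
    | none =>
      simp only
      rw [ih acc hnd' (fun q' hq' => hfresh q' (List.mem_cons_of_mem _ hq'))]
      simp [hg]
    | some kv =>
      have hkv1 : kv.1 = q.1 := by
        by_cases hc : 0 < pvLeft data q.2.1 q.2.2 ∧ pvLeft data q.2.1 q.2.2 < (data.length : Int) <;>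
          simp [pvG, hc] at hg
        rw [← hg]
      simp only
      have hfresh' : ∀ q' ∈ qs, (acc.insert kv.1 kv.2).contains q'.1 = false := by
        intro q' hq'
        rw [PySem.Dict.contains_insert]
        have : q'.1 ≠ kv.1 := by
          rw [hkv1]; intro he
          exact hqnot (he ▸ List.mem_map_of_mem hq')
        simp [this, hfresh q' (List.mem_cons_of_mem _ hq')]
      rw [ih _ hnd' hfresh']
      rw [PySem.Dict.items_insert_of_not_contains acc kv.2 (by rw [hkv1]; exact hq)]
      simp [hg]

lemma B_fold_some (attrs : List String) (data : List (String × List (String × String)))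
    (hnd : attrs.Nodup) :
    ∀ (qs : List (String × String × String)),
    (∀ q ∈ qs, q.2.1 ∈ attrs ∧ ∀ kd ∈ data, (kd.2.map Prod.fst).count q.2.1 = 1) →
    ∀ (k : String) (v : Int),
    qs.foldl (pvStepB (pvCounter attrs data) (data.length : Int)) (some k, some v)
      = (some ((qs.filterMap (pvG data)).foldl pvPick (k, v)).1,
         some ((qs.filterMap (pvG data)).foldl pvPick (k, v)).2) := by
  intro qs
  induction qs with
  | nil => simp
  | cons q qs ih0 =>
    intro hqs k v
    have ih := ih0 (fun q' h => hqs q' (List.mem_cons_of_mem _ h))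
    rw [List.foldl_cons]
    have hcl := counter_eq_left attrs data q.2.1 q.2.2 hnd
      (hqs q (List.mem_cons_self ..)).1 (hqs q (List.mem_cons_self ..)).2
    by_cases h : 0 < pvLeft data q.2.1 q.2.2 ∧ pvLeft data q.2.1 q.2.2 < (data.length : Int)
    · by_cases hlt : |2 * pvLeft data q.2.1 q.2.2 - (data.length : Int)| < v
      · have hstep : pvStepB (pvCounter attrs data) (data.length : Int) (some k, some v) q
            = (some q.1, some (|2 * pvLeft data q.2.1 q.2.2 - (data.length : Int)|)) := by
          unfold pvStepB; rw [hcl]; simp [h, hlt]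
        rw [hstep, ih]
        simp [pvG, h, pvPick, hlt]
      · have hstep : pvStepB (pvCounter attrs data) (data.length : Int) (some k, some v) q = (some k, some v) := by
          unfold pvStepB; rw [hcl]; simp [h, hlt]
        rw [hstep, ih]
        simp [pvG, h, pvPick, hlt]
    · have hstep : pvStepB (pvCounter attrs data) (data.length : Int) (some k, some v) q = (some k, some v) := by
        unfold pvStepB; rw [hcl]; simp [h]
      rw [hstep, ih]
      simp [pvG, h]

lemma B_fold_none (attrs : List String) (data : List (String × List (String × String)))
    (hnd : attrs.Nodup) :
    ∀ (qs : List (String × String × String)),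
    (∀ q ∈ qs, q.2.1 ∈ attrs ∧ ∀ kd ∈ data, (kd.2.map Prod.fst).count q.2.1 = 1) →
    qs.foldl (pvStepB (pvCounter attrs data) (data.length : Int)) (none, none)
      = match qs.filterMap (pvG data) with
        | [] => (none, none)
        | kv :: rest => (some ((rest.foldl pvPick kv).1), some ((rest.foldl pvPick kv).2)) := by
  intro qs
  induction qs with
  | nil => simp
  | cons q qs ih0 =>
    intro hqs
    have ih := ih0 (fun q' h => hqs q' (List.mem_cons_of_mem _ h))
    rw [List.foldl_cons]
    have hcl := counter_eq_left attrs data q.2.1 q.2.2 hnd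
      (hqs q (List.mem_cons_self ..)).1 (hqs q (List.mem_cons_self ..)).2
    by_cases h : 0 < pvLeft data q.2.1 q.2.2 ∧ pvLeft data q.2.1 q.2.2 < (data.length : Int)
    · have hstep : pvStepB (pvCounter attrs data) (data.length : Int) (none, none) q
          = (some q.1, some (|2 * pvLeft data q.2.1 q.2.2 - (data.length : Int)|)) := by
        unfold pvStepB; rw [hcl]; simp [h]
      rw [hstep, B_fold_some attrs data hnd qs (fun q' h => hqs q' (List.mem_cons_of_mem _ h))]
      simp [pvG, h]
    · have hstep : pvStepB (pvCounter attrs data) (data.length : Int) (none, none) q = (none, none) := by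
        unfold pvStepB; rw [hcl]; simp [h]
      rw [hstep, ih]
      simp [pvG, h]

-- ===== VERDICT (by name: the statement is the Claim_ definition above) =====
theorem best_QS_spec : Claim_equal_best_QS := by
  intro questions data _hdom hpre
  simp only [Spec_best_QS, best_QS, best_QS_alt]
  have hfresh : ∀ q ∈ questions, (PySem.Dict.empty : PySem.Dict String Int).contains q.1 = false := by
    intro q _; simp [PySem.Dict.contains_empty]
  rw [A_items data questions PySem.Dict.empty hpre.1 hfresh,
      B_fold_none (pvAttrs questions) data (PySem.Set.nodup_ofList _) questions
        (fun q hq => ⟨(PySem.Set.mem_ofList _ _).mpr (List.mem_map_of_mem hq),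
          fun kd hkd => hpre.2 q hq kd hkd⟩)]
  cases h : questions.filterMap (pvG data) with
  | nil => simp [PySem.Dict.empty]
  | cons kv rest => simp [PySem.Dict.empty]
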